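-- pv_equiv track=rewrite | github.com/abhineet-gupta/Twitter-Sentiment-Python-Weka-COMP90049 | freq.py | calc_word_freq
-- ===== SOURCE A (Python) =====
-- def calc_word_freq(tweets, labels):
--     '''
--     counts frequency of each word appearing in every tweet
--     @param tweets a dict of {ID: tweet} values
--     @param labels a dict of {ID: label}
--     @return dict containing {word: [pos, neu, neg]}
--     '''
--     _words_freq = {}
--     for tid in tweets:
--         temp_tweet = tweets[tid].split(" ")
--         for word in temp_tweet:
--             if word in _words_freq:
--                 if labels[tid] == 'positive':
--                     _words_freq[word][0] += 1
--                 elif labels[tid] == 'negative':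
--                     _words_freq[word][1] += 1
--                 else:   # neutral
--                     _words_freq[word][2] += 1
--             else:
--                 if labels[tid] == 'positive':
--                     _words_freq[word] = [1, 0, 0]
--                 elif labels[tid] == 'negative':
--                     _words_freq[word] = [0, 1, 0]
--                 else: # neutral
--                     _words_freq[word] = [0, 0, 1]
--     return _words_freq
-- ===== SOURCE B (Python) =====
-- def calc_word_freq(tweets, labels):
--     '''
--     counts frequency of each word appearing in every tweet
--     @param tweets a dict of {ID: tweet} values
--     @param labels a dict of {ID: label}
--     @return dict containing {word: [pos, neu, neg]}
--     '''
--     # partition the tweet texts into three groups by their label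
--     pos_texts = [text for tid, text in tweets.items() if labels[tid] == 'positive']
--     neg_texts = [text for tid, text in tweets.items() if labels[tid] == 'negative']
--     neu_texts = [text for tid, text in tweets.items()
--                  if labels[tid] != 'positive' and labels[tid] != 'negative']
--
--     def count_words(texts):
--         c = {}
--         for text in texts:
--             for w in text.split(" "):
--                 c[w] = c.get(w, 0) + 1
--         return c
--
--     pos_c = count_words(pos_texts)
--     neg_c = count_words(neg_texts)
--     neu_c = count_words(neu_texts)
--
--     # all words in order of first appearance across the tweets
--     order = dict.fromkeys(w for text in tweets.values() for w in text.split(" "))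
--     return {w: [pos_c.get(w, 0), neg_c.get(w, 0), neu_c.get(w, 0)] for w in order}
-- ===== Notes on version B (the rewrite author's own statement) =====
-- stated objective: alternative
-- what changed: Instead of one interleaved pass that branches on the label per word while mutating 3-slot lists in a shared dict, B partitions the tweet texts into three label groups, builds an independent word-count table per group, and assembles each word's [pos,neg,neu] row from the three tables at the end.
import Mathlib
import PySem

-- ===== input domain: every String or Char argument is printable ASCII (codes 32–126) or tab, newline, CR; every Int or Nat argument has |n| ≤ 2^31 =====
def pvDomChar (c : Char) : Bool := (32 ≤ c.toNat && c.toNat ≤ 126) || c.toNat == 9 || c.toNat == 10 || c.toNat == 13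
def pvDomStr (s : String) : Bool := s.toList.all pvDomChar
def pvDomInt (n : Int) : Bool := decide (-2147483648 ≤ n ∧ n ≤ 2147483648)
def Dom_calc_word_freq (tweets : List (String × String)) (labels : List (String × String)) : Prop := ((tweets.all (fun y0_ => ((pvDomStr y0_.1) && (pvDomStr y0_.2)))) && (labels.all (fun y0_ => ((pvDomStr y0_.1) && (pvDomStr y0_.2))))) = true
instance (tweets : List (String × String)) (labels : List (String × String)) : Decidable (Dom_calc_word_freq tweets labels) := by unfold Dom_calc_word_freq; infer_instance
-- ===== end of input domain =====

-- B rebuilds the same {word: [pos,neg,neu]} table by partitioning the tweet texts by label,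
-- counting each group separately and merging; same asymptotic cost (objective: alternative).

-- ===== PORT A =====
-- s.split(" "): split? is none only for an empty separator, so .getD [] is exact here
def cwfSplit (s : String) : List String := (PySem.Str.split? s " ").getD []

-- one body of A's inner loop: update the dict entry for one (word, label) event
def cwfStep (d : PySem.Dict String (List Int)) (word : String) (lab : String) :
    PySem.Dict String (List Int) :=
  if d.contains word then
    let v := d.getD word []
    if lab == "positive" then d.insert word (v.set 0 (v.getD 0 0 + 1))
    else if lab == "negative" then d.insert word (v.set 1 (v.getD 1 0 + 1))
    else d.insert word (v.set 2 (v.getD 2 0 + 1))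
  else
    if lab == "positive" then d.insert word [1, 0, 0]
    else if lab == "negative" then d.insert word [0, 1, 0]
    else d.insert word [0, 0, 1]

def calc_word_freq (tweets : List (String × String)) (labels : List (String × String)) :
    List (String × List Int) :=
  let tweetsD := PySem.Dict.ofList tweets
  let labelsD := PySem.Dict.ofList labels
  -- labels[tid] is exact under Pre_ (every tweet id has a label); getD never defaults there
  (tweetsD.items.foldl (fun d p =>
      (cwfSplit p.2).foldl (fun d word => cwfStep d word (labelsD.getD p.1 "")) d)
    PySem.Dict.empty).items

-- ===== PORT B =====
-- count_words: one word-count table for one group of texts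
def cwfCountWords (texts : List String) : PySem.Dict String Int :=
  texts.foldl (fun c t =>
      (cwfSplit t).foldl (fun c w => c.modify w 0 (· + 1)) c)
    PySem.Dict.empty

def calc_word_freq_alt (tweets : List (String × String)) (labels : List (String × String)) :
    List (String × List Int) :=
  let tweetsD := PySem.Dict.ofList tweets
  let labelsD := PySem.Dict.ofList labels
  let lab := fun tid => labelsD.getD tid ""   -- labels[tid], exact under Pre_
  let pos_texts := (tweetsD.items.filter (fun p => lab p.1 == "positive")).map (·.2)
  let neg_texts := (tweetsD.items.filter (fun p => lab p.1 == "negative")).map (·.2)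
  let neu_texts := (tweetsD.items.filter (fun p =>
      !(lab p.1 == "positive") && !(lab p.1 == "negative"))).map (·.2)
  let pos_c := cwfCountWords pos_texts
  let neg_c := cwfCountWords neg_texts
  let neu_c := cwfCountWords neu_texts
  let order := PySem.List.dedup (tweetsD.values.flatMap (fun t => cwfSplit t))
  order.map (fun w => (w, [pos_c.getD w 0, neg_c.getD w 0, neu_c.getD w 0]))

-- ===== PRECONDITION & SPEC =====
-- Pre_ excludes exactly the inputs where A raises KeyError: a tweet id with no entry in labels.
def Pre_calc_word_freq (tweets : List (String × String)) (labels : List (String × String)) : Prop :=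
  ∀ p ∈ tweets, ∃ q ∈ labels, q.1 = p.1
instance (tweets : List (String × String)) (labels : List (String × String)) : Decidable (Pre_calc_word_freq tweets labels) := by unfold Pre_calc_word_freq; infer_instance
def pvWitness_calc_word_freq : (List (String × String)) × (List (String × String)) :=
  ([("1", "good day"), ("2", "bad day")], [("1", "positive"), ("2", "negative")])
def Spec_calc_word_freq (tweets : List (String × String)) (labels : List (String × String)) (out : List (String × List Int)) : Prop := out = calc_word_freq_alt tweets labels
instance (tweets : List (String × String)) (labels : List (String × String)) (out : List (String × List Int)) : Decidable (Spec_calc_word_freq tweets labels out) := by unfold Spec_calc_word_freq; infer_instance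

-- ===== CLAIM (what is proved, stated in full; the proofs are below) =====
def Claim_equal_calc_word_freq : Prop := ∀ (tweets : List (String × String)) (labels : List (String × String)), Dom_calc_word_freq tweets labels → Pre_calc_word_freq tweets labels → Spec_calc_word_freq tweets labels (calc_word_freq tweets labels)

-- ===== LEMMAS AND PROOFS =====

-- the stream of (word, label) events A processes, in order
def cwfEvs (L : String → String) (items : List (String × String)) : List (String × String) :=
  items.flatMap (fun p => (cwfSplit p.2).map (fun w => (w, L p.1)))

-- the row A ends up storing for word w after processing evs
def cwfRow (w : String) (evs : List (String × String)) : List Int :=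
  [ (evs.countP (fun e => e.1 == w && e.2 == "positive") : Int),
    (evs.countP (fun e => e.1 == w && e.2 == "negative") : Int),
    (evs.countP (fun e => e.1 == w && (!(e.2 == "positive") && !(e.2 == "negative"))) : Int) ]

lemma cwf_foldA_eq_evs (L : String → String) (items : List (String × String))
    (d : PySem.Dict String (List Int)) :
    items.foldl (fun d p =>
        (cwfSplit p.2).foldl (fun d word => cwfStep d word (L p.1)) d) d
      = (cwfEvs L items).foldl (fun d e => cwfStep d e.1 e.2) d := by
  induction items generalizing d with
  | nil => rfl
  | cons p rest ih =>
      simp only [List.foldl_cons, cwfEvs, List.flatMap_cons, List.foldl_append, List.foldl_map, ih]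

lemma cwf_dedup_append (xs : List String) (x : String) :
    PySem.List.dedup (xs ++ [x]) =
      if x ∈ xs then PySem.List.dedup xs else PySem.List.dedup xs ++ [x] := by
  simp only [PySem.List.dedup_eq_ofList, PySem.Set.ofList_eq_foldl, List.foldl_append,
    List.foldl_cons, List.foldl_nil]
  rw [PySem.Set.add_eq_ite]
  simp [PySem.Set.mem_ofList, ← PySem.Set.ofList_eq_foldl]

lemma cwfRow_append_ne (w : String) (evs : List (String × String)) (e : String × String)
    (h : ¬ e.1 = w) : cwfRow w (evs ++ [e]) = cwfRow w evs := by
  simp [cwfRow, List.countP_append, h]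

lemma cwfRow_append_pos (evs : List (String × String)) (w : String) :
    cwfRow w (evs ++ [(w, "positive")])
      = (cwfRow w evs).set 0 ((cwfRow w evs).getD 0 0 + 1) := by
  simp [cwfRow, List.countP_append]

lemma cwfRow_append_neg (evs : List (String × String)) (w : String) :
    cwfRow w (evs ++ [(w, "negative")])
      = (cwfRow w evs).set 1 ((cwfRow w evs).getD 1 0 + 1) := by
  simp [cwfRow, List.countP_append]

lemma cwfRow_append_neu (evs : List (String × String)) (w lab : String)
    (hp : ¬ lab = "positive") (hn : ¬ lab = "negative") :
    cwfRow w (evs ++ [(w, lab)])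
      = (cwfRow w evs).set 2 ((cwfRow w evs).getD 2 0 + 1) := by
  simp [cwfRow, List.countP_append, hp, hn]

lemma cwfRow_not_mem (w : String) (evs : List (String × String))
    (h : w ∉ evs.map Prod.fst) : cwfRow w evs = [0, 0, 0] := by
  have hz : ∀ q : String → Bool,
      evs.countP (fun e => e.1 == w && q e.2) = 0 := by
    intro q
    refine List.countP_eq_zero.mpr ?_
    intro a ha
    have : a.1 ≠ w := fun hw => h (hw ▸ List.mem_map_of_mem ha)
    simp [this]
  simp only [cwfRow]
  rw [hz (fun b => b == "positive"), hz (fun b => b == "negative"),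
    hz (fun b => !(b == "positive") && !(b == "negative"))]
  simp

-- main invariant: A's dict after processing evs, as an explicit items list
lemma cwf_fold_items (evs : List (String × String)) :
    ((evs.foldl (fun d e => cwfStep d e.1 e.2) PySem.Dict.empty).items)
      = (PySem.List.dedup (evs.map Prod.fst)).map (fun w => (w, cwfRow w evs)) := by
  induction evs using List.reverseRecOn with
  | nil => rfl
  | append_singleton evs e ih =>
      rw [List.foldl_append, List.foldl_cons, List.foldl_nil]
      set d := evs.foldl (fun d e => cwfStep d e.1 e.2) PySem.Dict.empty with hd
      have hkeys : d.keys = PySem.List.dedup (evs.map Prod.fst) := by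
        simp [PySem.Dict.keys, ih, Function.comp_def]
      have hnd : d.keys.Nodup := by
        rw [hkeys, PySem.List.dedup_eq_ofList]; exact PySem.Set.nodup_ofList _
      have hc : d.contains e.1 = decide (e.1 ∈ evs.map Prod.fst) := by
        rw [PySem.Dict.contains_eq_decide_mem_keys, hkeys]
        simp
      rw [List.map_append, List.map_singleton, cwf_dedup_append]
      by_cases hmem : e.1 ∈ evs.map Prod.fst
      · -- the word was seen before: A overwrites its row in place
        rw [if_pos hmem]
        have hcT : d.contains e.1 = true := by rw [hc]; simpa using hmem
        have hrowmem : (e.1, cwfRow e.1 evs) ∈ d.items := by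
          rw [ih]
          exact List.mem_map_of_mem (by rwa [PySem.List.mem_dedup])
        have hget : d.getD e.1 [] = cwfRow e.1 evs :=
          PySem.Dict.getD_of_mem_items d hrowmem hnd []
        have key : ∀ v : List Int, v = cwfRow e.1 (evs ++ [e]) →
            (d.insert e.1 v).items
              = (PySem.List.dedup (evs.map Prod.fst)).map
                  (fun w => (w, cwfRow w (evs ++ [e]))) := by
          intro v hv
          rw [PySem.Dict.items_insert_of_contains d v hcT, ih, List.map_map]
          refine List.map_congr_left (fun w hw => ?_)
          by_cases hwe : e.1 = w
          · subst hwe; simp [hv]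
          · have hwne : ¬ w = e.1 := fun h => hwe h.symm
            simp [hwne, cwfRow_append_ne w evs e hwe]
        simp only [cwfStep, hcT, if_true, hget]
        by_cases hp : e.2 == "positive"
        · rw [if_pos hp]
          refine key _ ?_
          have he : e = (e.1, "positive") := by
            rw [← (by simpa using hp : e.2 = "positive")]
          rw [he, cwfRow_append_pos]
        · rw [if_neg (by simpa using hp)]
          by_cases hn : e.2 == "negative"
          · rw [if_pos hn]
            refine key _ ?_
            have he : e = (e.1, "negative") := by
              rw [← (by simpa using hn : e.2 = "negative")]
            rw [he, cwfRow_append_neg]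
          · rw [if_neg (by simpa using hn)]
            refine key _ ?_
            have he : e = (e.1, e.2) := rfl
            rw [he, cwfRow_append_neu evs e.1 e.2 (by simpa using hp) (by simpa using hn)]
      · -- a fresh word: A appends a new row
        rw [if_neg hmem, List.map_append, List.map_singleton]
        have hcF : d.contains e.1 = false := by rw [hc]; simpa using hmem
        have hrows : (PySem.List.dedup (evs.map Prod.fst)).map
              (fun w => (w, cwfRow w evs))
            = (PySem.List.dedup (evs.map Prod.fst)).map
              (fun w => (w, cwfRow w (evs ++ [e]))) := by
          refine List.map_congr_left (fun w hw => ?_)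
          have hwe : ¬ e.1 = w := fun hwe =>
            hmem (by rw [hwe]; rwa [PySem.List.mem_dedup] at hw)
          rw [cwfRow_append_ne w evs e hwe]
        have h0 : cwfRow e.1 evs = [0, 0, 0] := cwfRow_not_mem e.1 evs hmem
        have key : ∀ v : List Int, v = cwfRow e.1 (evs ++ [e]) →
            (d.insert e.1 v).items
              = (PySem.List.dedup (evs.map Prod.fst)).map
                  (fun w => (w, cwfRow w (evs ++ [e]))) ++ [(e.1, cwfRow e.1 (evs ++ [e]))] := by
          intro v hv
          rw [PySem.Dict.items_insert_of_not_contains d v hcF, ih, hrows, hv]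
        have hparts : ∀ q : String → Bool, evs.countP (fun x => x.1 == e.1 && q x.2) = 0 := by
          intro q
          refine List.countP_eq_zero.mpr (fun a ha => ?_)
          have : a.1 ≠ e.1 := fun hw => hmem (hw ▸ List.mem_map_of_mem ha)
          simp [this]
        simp only [cwfStep, hcF, Bool.false_eq_true, if_false]
        have hstep : ∀ lab, cwfRow e.1 (evs ++ [(e.1, lab)])
            = [ (if lab == "positive" then 1 else 0),
                (if lab == "negative" then 1 else 0),
                (if !(lab == "positive") && !(lab == "negative") then 1 else 0) ] := by
          intro lab
          simp only [cwfRow, List.countP_append]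
          rw [hparts (fun b => b == "positive"), hparts (fun b => b == "negative"),
            hparts (fun b => !(b == "positive") && !(b == "negative"))]
          simp only [List.countP_cons, List.countP_nil, BEq.rfl, Bool.true_and, Nat.zero_add]
          split_ifs <;> simp_all
        have he : e = (e.1, e.2) := rfl
        by_cases hp : e.2 == "positive"
        · rw [if_pos hp]
          refine key _ ?_
          rw [he, hstep e.2]
          have hnn : ¬ e.2 = "negative" := by
            rw [(by simpa using hp : e.2 = "positive")]; decide
          simp [hp, hnn]
        · rw [if_neg (by simpa using hp)]
          by_cases hn : e.2 == "negative"
          · rw [if_pos hn]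
            refine key _ ?_
            rw [he, hstep e.2]
            simp [hp, hn]
          · rw [if_neg (by simpa using hn)]
            refine key _ ?_
            rw [he, hstep e.2]
            simp [hp, hn]

lemma cwf_count_filter (L : String → String) (q : String → Bool) (w : String)
    (items : List (String × String)) :
    ((items.filter (fun p => q (L p.1))).flatMap
        (fun p => cwfSplit p.2)).count w
      = (cwfEvs L items).countP (fun e => e.1 == w && q e.2) := by
  induction items with
  | nil => rfl
  | cons p rest ih =>
      simp only [cwfEvs, List.flatMap_cons, List.countP_append, List.countP_map,
        Function.comp_def, List.filter_cons]
      by_cases h : q (L p.1) = true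
      · simp only [h, if_true, List.flatMap_cons, List.count_append, ih, cwfEvs]
        congr 1
        simp [List.count_eq_countP]
      · simp only [h, Bool.false_eq_true, if_false]
        simpa [cwfEvs] using ih

lemma cwf_countWords_aux (texts : List String) (c : PySem.Dict String Int) (w : String) :
    (texts.foldl (fun c t => (cwfSplit t).foldl (fun c w => c.modify w 0 (· + 1)) c) c).getD w 0
      = c.getD w 0 + ((texts.flatMap (fun t => cwfSplit t)).count w : Int) := by
  induction texts generalizing c with
  | nil => simp
  | cons t rest ih =>
      simp only [List.foldl_cons, List.flatMap_cons, List.count_append, ih,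
        PySem.Dict.getD_foldl_modify_add_one]
      push_cast
      ring

lemma cwf_countWords_getD (texts : List String) (w : String) :
    (cwfCountWords texts).getD w 0
      = ((texts.flatMap (fun t => cwfSplit t)).count w : Int) := by
  unfold cwfCountWords
  rw [cwf_countWords_aux]
  simp

-- ===== VERDICT (by name: the statement is the Claim_ definition above) =====
theorem calc_word_freq_spec : Claim_equal_calc_word_freq := by
  unfold Claim_equal_calc_word_freq
  intro tweets labels _ _
  unfold Spec_calc_word_freq
  show calc_word_freq tweets labels = calc_word_freq_alt tweets labels
  simp only [calc_word_freq, calc_word_freq_alt]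
  rw [cwf_foldA_eq_evs (fun tid => (PySem.Dict.ofList labels).getD tid "")
    (PySem.Dict.ofList tweets).items, cwf_fold_items]
  have hwords : ((cwfEvs (fun tid => (PySem.Dict.ofList labels).getD tid "")
        (PySem.Dict.ofList tweets).items).map Prod.fst)
      = (PySem.Dict.ofList tweets).values.flatMap (fun t => cwfSplit t) := by
    simp [cwfEvs, PySem.Dict.values, List.map_flatMap, List.flatMap_map, Function.comp_def]
  rw [hwords]
  refine List.map_congr_left (fun w hw => ?_)
  refine Prod.ext rfl ?_
  simp only [cwfRow, cwf_countWords_getD, List.flatMap_map]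
  rw [← cwf_count_filter (fun tid => (PySem.Dict.ofList labels).getD tid "")
      (fun b => b == "positive") w,
    ← cwf_count_filter (fun tid => (PySem.Dict.ofList labels).getD tid "")
      (fun b => b == "negative") w,
    ← cwf_count_filter (fun tid => (PySem.Dict.ofList labels).getD tid "")
      (fun b => !(b == "positive") && !(b == "negative")) w]
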